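-- pv_equiv track=rewrite | github.com/danilobispo/MutRoSe-UPPAAL-Generator | uppaal_utils.py | is_operand_completed
-- ===== SOURCE A (Python) =====
-- def is_operand_completed(operands_list, completed_operands):
--     result: bool = False
--     for operand in operands_list:
--         if operand in completed_operands:
--             result = True
--         else:
--             result = False
--     return result
-- ===== SOURCE B (Python) =====
-- def is_operand_completed(operands_list, completed_operands):
--     return bool(operands_list) and (operands_list[-1] in completed_operands)
-- ===== Notes on version B (the rewrite author's own statement) =====
-- stated objective: simpler
-- what changed: The loop (whose result is overwritten on every iteration) is replaced by a single membership test on the last element, with False for the empty list.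
import Mathlib
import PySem

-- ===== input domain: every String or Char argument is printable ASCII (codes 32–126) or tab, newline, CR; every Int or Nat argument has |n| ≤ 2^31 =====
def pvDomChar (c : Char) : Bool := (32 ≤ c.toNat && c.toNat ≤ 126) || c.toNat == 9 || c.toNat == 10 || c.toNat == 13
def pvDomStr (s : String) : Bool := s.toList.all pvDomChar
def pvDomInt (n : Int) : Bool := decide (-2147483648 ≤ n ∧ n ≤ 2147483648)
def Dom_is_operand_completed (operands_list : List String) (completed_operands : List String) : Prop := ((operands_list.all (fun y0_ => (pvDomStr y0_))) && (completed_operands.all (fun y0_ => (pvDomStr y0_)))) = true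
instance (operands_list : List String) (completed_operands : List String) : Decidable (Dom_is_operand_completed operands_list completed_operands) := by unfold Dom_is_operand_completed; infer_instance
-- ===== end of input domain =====

-- B replaces A's loop (whose result is overwritten each iteration) by one membership
-- test on the last element; simpler, same return value.

-- ===== PORT A =====
-- A: fold over the list, setting result to the membership of the current operand.
def is_operand_completed (operands_list : List String) (completed_operands : List String) : Bool :=
  operands_list.foldl (fun _ operand => completed_operands.contains operand) false

-- ===== PORT B =====
-- B: bool(operands_list) and operands_list[-1] in completed_operands
def is_operand_completed_alt (operands_list : List String) (completed_operands : List String) : Bool :=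
  !operands_list.isEmpty && (match PySem.List.pyGet? operands_list (-1) with
    | some x => completed_operands.contains x
    | none => false)

-- ===== PRECONDITION & SPEC =====
def Spec_is_operand_completed (operands_list : List String) (completed_operands : List String) (out : Bool) : Prop := out = is_operand_completed_alt operands_list completed_operands
instance (operands_list : List String) (completed_operands : List String) (out : Bool) : Decidable (Spec_is_operand_completed operands_list completed_operands out) := by unfold Spec_is_operand_completed; infer_instance

-- ===== CLAIM (what is proved, stated in full; the proofs are below) =====
def Claim_equal_is_operand_completed : Prop := ∀ (operands_list : List String) (completed_operands : List String), Dom_is_operand_completed operands_list completed_operands → Spec_is_operand_completed operands_list completed_operands (is_operand_completed operands_list completed_operands)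

-- ===== LEMMAS AND PROOFS =====
-- The fold ignores its accumulator, so its value is the membership of the last element.
theorem fold_last (completed : List String) :
    ∀ (xs : List String) (b : Bool),
      xs.foldl (fun _ operand => completed.contains operand) b =
        match xs.getLast? with
        | some x => completed.contains x
        | none => b := by
  intro xs
  induction xs with
  | nil => intro b; rfl
  | cons h t ih =>
    intro b
    simp only [List.foldl_cons, ih]
    cases ht : t.getLast? with
    | some x => simp [List.getLast?_cons, ht]
    | none =>
      have : t = [] := by cases t with
        | nil => rfl
        | cons a s => simp at ht
      subst this; rfl

theorem pyGet_neg_one (xs : List String) (h : xs ≠ []) :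
    PySem.List.pyGet? xs (-1) = xs.getLast? := by
  cases xs with
  | nil => exact absurd rfl h
  | cons a t =>
    simp [PySem.List.pyGet?, PySem.List.pyIdx?, List.getLast?_eq_getElem?]

-- ===== VERDICT (by name: the statement is the Claim_ definition above) =====
theorem is_operand_completed_spec : Claim_equal_is_operand_completed := by
  intro xs cs _
  unfold Spec_is_operand_completed is_operand_completed is_operand_completed_alt
  cases hx : xs with
  | nil => rfl
  | cons a t =>
    rw [fold_last]
    rw [pyGet_neg_one _ (by simp)]
    cases h : (a :: t).getLast? with
    | some x => simp
    | none => simp at h
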